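-- pv_equiv track=rewrite | github.com/SatyamVyas04/Strivers_A2Z_DSA | 07. Recursion/7.1. StrongHold/3. GoodNumbers.py | goodNumbers
-- ===== SOURCE A (Python) =====
-- from typing import List
--
-- def goodNumbers(a: int, b: int, digit: int) -> List[int]:
--     arr = []
--     for i in range(a, b+1):
--         if str(digit) in str(i):
--             continue
--         i = str(i)
--         index = len(i) - 2
--         flag = 1
--         while index > -1:
--             if int(i[index]) <= sum(map(int, i[index+1:])):
--                 flag = 0
--             index = index-1
--         if flag:
--             arr.append(int(i))
--     return arr
-- ===== SOURCE B (Python) =====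
-- def goodNumbers(a, b, digit):
--     # Constructively generate the (finitely many) numbers whose every digit
--     # strictly exceeds the sum of the digits to its right, by appending digits
--     # with a "min slack" budget; filter to [a, b] and the not-containing-digit
--     # condition, and return in ascending order.
--     s = str(digit)
--     def gen(v, m):
--         # v: a valid number (digit-wise); m: largest slack + 1 minus 1, i.e.
--         # a digit c may be appended iff 0 <= c < m, giving slack min(m - c, c).
--         res = [v] if a <= v <= b and s not in str(v) else []
--         for c in range(m):
--             res += gen(10 * v + c, min(m - c, c))
--         return res
--     cand = []
--     for d in range(10):
--         cand += gen(d, d)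
--     return sorted(cand)
-- ===== Notes on version B (the rewrite author's own statement) =====
-- stated objective: faster
-- what changed: Instead of scanning every integer in [a,b] and re-checking its digit string with a quadratic inner loop, B constructively generates the finitely many numbers satisfying the digit>suffix-sum property by recursive digit appending with a slack budget, filters them to [a,b] and the substring condition, and sorts ascending; intended as faster (cost independent of b-a; a timing run measured up to ~670x on large ranges, though small/empty ranges are equally fast either way).
-- outside the precondition, e.g. on goodNumbers(-1, -1, -1): A returns [], B returns []
import Mathlib
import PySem

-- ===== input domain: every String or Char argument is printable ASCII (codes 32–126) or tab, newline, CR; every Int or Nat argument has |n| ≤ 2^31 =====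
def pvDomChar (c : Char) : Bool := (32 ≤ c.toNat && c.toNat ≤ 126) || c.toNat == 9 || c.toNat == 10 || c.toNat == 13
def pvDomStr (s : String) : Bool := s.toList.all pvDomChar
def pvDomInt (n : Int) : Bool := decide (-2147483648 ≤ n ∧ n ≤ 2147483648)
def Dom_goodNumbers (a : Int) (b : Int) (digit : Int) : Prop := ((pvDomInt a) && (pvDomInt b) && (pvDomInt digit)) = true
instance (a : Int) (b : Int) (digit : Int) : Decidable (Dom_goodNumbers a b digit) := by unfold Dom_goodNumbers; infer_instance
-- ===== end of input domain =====

-- B replaces A's scan of every integer in [a,b] (each re-checked by a quadratic digit loop) with a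
-- recursive constructive generation of the finitely many digit-valid numbers, filtered and sorted:
-- intended as faster on large ranges (timing run measured up to ~670x there, no gain on tiny ranges).


-- ===== PORT A =====
-- int(ch) for a single character, total form: in A the argument is always a decimal digit
-- (Pre_ excludes ranges with negative numbers, whose '-' character would raise ValueError).
def pyIntChar (c : Char) : Int := (PySem.Int.ofChars? [c]).getD 0

-- the 'while index > -1' loop; cs[index] is always in range when entered (index ≤ len-2).
def loopA (cs : List Char) (index : Int) (flag : Int) : Int :=
  if _h : index > -1 then
    let flag' := if pyIntChar (PySem.List.pyGetD cs index '0') ≤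
        ((PySem.List.slice cs (some (index + 1)) none).map pyIntChar).sum then 0 else flag
    loopA cs (index - 1) flag'
  else flag
termination_by (index + 1).toNat
decreasing_by omega

-- 'arr.append(int(i))' re-parses str(i₀) of the loop variable i₀; int(str(i₀)) = i₀ exactly in Python,
-- so the original integer is appended.
def goodNumbers (a : Int) (b : Int) (digit : Int) : List Int :=
  (PySem.List.pyRange a (b + 1) 1).foldl (fun arr i =>
    if PySem.Chars.isIn (PySem.Int.toChars digit) (PySem.Int.toChars i) then arr
    else
      let s := PySem.Int.toChars i
      let flag := loopA s (PySem.List.len s - 2) 1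
      if flag ≠ 0 then arr ++ [i] else arr) []

-- ===== PORT B =====
def genB (a b : Int) (s : List Char) (v m : Int) : List Int :=
  let res := if a ≤ v ∧ v ≤ b ∧ ¬ (PySem.Chars.isIn s (PySem.Int.toChars v) = true) then [v] else []
  (PySem.List.pyRange 0 m 1).attach.foldl
    (fun res c => res ++ genB a b s (10 * v + c.1) (min (m - c.1) c.1)) res
termination_by m.toNat
decreasing_by
  have hc := c.2
  rw [PySem.List.mem_pyRange_one] at hc
  rcases le_total (m - c.1) c.1 with h | h
  · rw [min_eq_left h]; omega
  · rw [min_eq_right h]; omega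

def goodNumbers_alt (a : Int) (b : Int) (digit : Int) : List Int :=
  let s := PySem.Int.toChars digit
  let cand := (PySem.List.pyRange 0 10 1).foldl (fun cand d => cand ++ genB a b s d d) []
  PySem.List.sorted cand (fun x => x) false

-- ===== PRECONDITION & SPEC =====
-- Pre_ excludes nonempty ranges that reach negative numbers: there A raises ValueError
-- (int('-') on the minus sign) on the first negative number not containing str(digit);
-- the accidental cases where every negative number in the range contains str(digit)
-- (so A returns) are excluded with them.
def Pre_goodNumbers (a : Int) (b : Int) (digit : Int) : Prop := 0 ≤ a ∨ b < a
instance (a : Int) (b : Int) (digit : Int) : Decidable (Pre_goodNumbers a b digit) := by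
  unfold Pre_goodNumbers; infer_instance

def pvWitness_goodNumbers : Int × Int × Int := (0, 30, 5)

def Spec_goodNumbers (a : Int) (b : Int) (digit : Int) (out : List Int) : Prop := out = goodNumbers_alt a b digit
instance (a : Int) (b : Int) (digit : Int) (out : List Int) : Decidable (Spec_goodNumbers a b digit out) := by unfold Spec_goodNumbers; infer_instance

-- ===== CLAIM (what is proved, stated in full; the proofs are below) =====
def Claim_equal_goodNumbers : Prop := ∀ (a : Int) (b : Int) (digit : Int), Dom_goodNumbers a b digit → Pre_goodNumbers a b digit → Spec_goodNumbers a b digit (goodNumbers a b digit)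

-- ===== LEMMAS AND PROOFS =====


def digs (n : Nat) : List Char :=
  if h : n < 10 then [Nat.digitChar n] else digs (n / 10) ++ [Nat.digitChar (n % 10)]
termination_by n
decreasing_by omega

lemma toDigitsCore_eq_digs (f : Nat) : ∀ n acc, n < f →
    Nat.toDigitsCore 10 f n acc = digs n ++ acc := by
  induction f with
  | zero => intro n acc h; omega
  | succ f ih =>
    intro n acc h
    rw [Nat.toDigitsCore]
    by_cases h10 : n < 10
    · have : n / 10 = 0 := Nat.div_eq_of_lt h10
      simp only [this]
      rw [digs, dif_pos h10, Nat.mod_eq_of_lt h10]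
      rfl
    · have hne : n / 10 ≠ 0 := by omega
      simp only [if_neg hne]
      rw [ih (n / 10) _ (by omega)]
      conv_rhs => rw [digs]
      rw [dif_neg h10]
      simp

lemma toChars_nonneg (w : Int) (h : 0 ≤ w) : PySem.Int.toChars w = digs w.toNat := by
  rw [PySem.Int.toChars, if_neg (by omega)]
  rw [Nat.toDigits, toDigitsCore_eq_digs _ _ _ (by omega), List.append_nil]

lemma pyIntChar_digitChar (r : Nat) (h : r < 10) : pyIntChar (Nat.digitChar r) = (r : Int) := by
  interval_cases r <;> decide

def dv (n : Nat) : List Int := (digs n).map pyIntChar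

lemma dv_small (n : Nat) (h : n < 10) : dv n = [(n : Int)] := by
  rw [dv, digs, dif_pos h, List.map_singleton, pyIntChar_digitChar n h]

lemma dv_step (v c : Nat) (hv : 1 ≤ v) (hc : c < 10) :
    dv (10 * v + c) = dv v ++ [(c : Int)] := by
  rw [dv, digs, dif_neg (by omega)]
  have h1 : (10 * v + c) / 10 = v := by omega
  have h2 : (10 * v + c) % 10 = c := by omega
  rw [h1, h2, List.map_append, List.map_singleton, pyIntChar_digitChar c hc]
  rfl

lemma digs_ne_nil (n : Nat) : digs n ≠ [] := by
  rw [digs]; split <;> simp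

lemma dv_ne_nil (n : Nat) : dv n ≠ [] := by
  rw [dv]; simp [digs_ne_nil]

lemma digs_shape (n : Nat) : ∀ c ∈ digs n, ∃ r : Nat, r < 10 ∧ c = Nat.digitChar r := by
  induction n using Nat.strong_induction_on with
  | _ n ih =>
    intro c hc
    rw [digs] at hc
    split at hc
    · simp at hc; exact ⟨n, by omega, hc⟩
    · rename_i h10
      rw [List.mem_append] at hc
      rcases hc with hc | hc
      · exact ih (n / 10) (by omega) c hc
      · simp at hc; exact ⟨n % 10, by omega, hc⟩

lemma dv_entries (n : Nat) : ∀ x ∈ dv n, 0 ≤ x ∧ x < 10 := by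
  intro x hx
  rw [dv, List.mem_map] at hx
  obtain ⟨c, hc, rfl⟩ := hx
  obtain ⟨r, hr, rfl⟩ := digs_shape n c hc
  rw [pyIntChar_digitChar r hr]
  omega


def Valid (ds : List Int) : Prop :=
  ∀ j : Nat, j + 1 < ds.length → (ds.drop (j + 1)).sum < ds.getD j 0

def slackAfter (m : Int) (ds : List Int) : Int := ds.foldl (fun m c => min (m - c) c) m

def slackOf (ds : List Int) : Int := slackAfter (ds.headD 0) ds.tail

lemma slackAfter_snoc (m : Int) (ds : List Int) (c : Int) :
    slackAfter m (ds ++ [c]) = min (slackAfter m ds - c) c := by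
  simp [slackAfter, List.foldl_append]

lemma slack_snoc (p : List Int) (hp : p ≠ []) (c : Int) :
    slackOf (p ++ [c]) = min (slackOf p - c) c := by
  obtain ⟨x, t, rfl⟩ := List.exists_cons_of_ne_nil hp
  simp [slackOf, slackAfter_snoc]

lemma getD_append_lt (p : List Int) (q : List Int) (j : Nat) (h : j < p.length) :
    (p ++ q).getD j 0 = p.getD j 0 := by
  rw [List.getD_eq_getElem?_getD, List.getD_eq_getElem?_getD, List.getElem?_append_left h]

lemma getD_append_self (p : List Int) (e : Int) :
    (p ++ [e]).getD p.length 0 = e := by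
  rw [List.getD_eq_getElem?_getD, List.getElem?_append_right (le_refl _)]
  simp

lemma drop_append_self (p : List Int) (e : Int) :
    (p ++ [e]).drop (p.length + 1) = [] := by
  apply List.drop_eq_nil_of_le
  simp

-- the j-th condition of p ++ [e], split
lemma cond_append (p : List Int) (e : Int) (j : Nat) (hj : j < p.length) :
    ((p ++ [e]).drop (j + 1)).sum = (p.drop (j + 1)).sum + e := by
  rw [List.drop_append_of_le_length (by omega), List.sum_append, List.sum_singleton]

lemma keyK (p : List Int) (hp : p ≠ []) (c : Int) :
    (∀ j : Nat, j < p.length → (p.drop (j + 1)).sum + c < p.getD j 0) ↔ c < slackOf p := by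
  induction p using List.reverseRecOn generalizing c with
  | nil => exact absurd rfl hp
  | append_singleton p e ih =>
    rcases List.eq_nil_or_concat' p with rfl | ⟨q, y, rfl⟩
    · constructor
      · intro h
        have := h 0 (by simp)
        simpa [slackOf, slackAfter] using this
      · intro h j hj
        have hj0 : j = 0 := by simp at hj; omega
        subst hj0
        simpa [slackOf, slackAfter] using h
    · set P := q ++ [y] with hP
      have hPne : P ≠ [] := by simp [hP]
      rw [slack_snoc P hPne e]
      constructor
      · intro h
        have h2 : c < e := by
          have := h P.length (by simp)
          rw [getD_append_self, drop_append_self] at this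
          simpa using this
        have h1 : e + c < slackOf P := by
          rw [← ih hPne (e + c)]
          intro j hj
          have := h j (by simp; omega)
          rw [getD_append_lt P [e] j hj, cond_append P e j hj] at this
          omega
        omega
      · intro h j hj
        simp only [List.length_append, List.length_singleton] at hj
        rcases Nat.lt_or_ge j P.length with hjP | hjP
        · rw [getD_append_lt P [e] j hjP, cond_append P e j hjP]
          have h1 : e + c < slackOf P := by omega
          have := (ih hPne (e + c)).mpr h1 j hjP
          omega
        · have hj' : j = P.length := by omega
          subst hj'
          rw [getD_append_self, drop_append_self]
          simp
          omega

lemma Valid_snoc (p : List Int) (hp : p ≠ []) (c : Int) :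
    Valid (p ++ [c]) ↔ c < slackOf p := by
  rw [← keyK p hp c]
  unfold Valid
  constructor
  · intro h j hj
    have := h j (by simp; omega)
    rw [getD_append_lt p [c] j hj, cond_append p c j hj] at this
    omega
  · intro h j hj
    simp only [List.length_append, List.length_singleton] at hj
    have hjp : j < p.length := by omega
    rw [getD_append_lt p [c] j hjp, cond_append p c j hjp]
    have := h j hjp
    omega

lemma Valid_prefix (p : List Int) (c : Int) (hc : 0 ≤ c) (h : Valid (p ++ [c])) : Valid p := by
  intro j hj
  have hjp : j < p.length := by omega
  have := h j (by simp; omega)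
  rw [getD_append_lt p [c] j hjp, cond_append p c j hjp] at this
  omega

lemma Valid_singleton (d : Int) : Valid [d] := by
  intro j hj
  simp at hj

lemma slackAfter_le (m : Int) (ds : List Int) (h : ∀ x ∈ ds, 0 ≤ x) : slackAfter m ds ≤ m := by
  induction ds generalizing m with
  | nil => simp [slackAfter]
  | cons x t ih =>
    have hx : 0 ≤ x := h x List.mem_cons_self
    have : slackAfter (min (m - x) x) t ≤ min (m - x) x :=
      ih (min (m - x) x) (fun y hy => h y (List.mem_cons_of_mem _ hy))
    simp only [slackAfter, List.foldl_cons] at *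
    omega

lemma slackOf_le_nine (n : Nat) : slackOf (dv n) ≤ 9 := by
  obtain ⟨x, t, hxt⟩ := List.exists_cons_of_ne_nil (dv_ne_nil n)
  have hx : 0 ≤ x ∧ x < 10 := dv_entries n x (by rw [hxt]; exact List.mem_cons_self)
  have ht : ∀ y ∈ t, 0 ≤ y := fun y hy =>
    (dv_entries n y (by rw [hxt]; exact List.mem_cons_of_mem _ hy)).1
  have := slackAfter_le x t ht
  rw [slackOf, hxt]
  simp only [List.headD_cons, List.tail_cons]
  omega

def Chain : Int → List Int → Prop
  | _, [] => True
  | m, c :: cs => 0 ≤ c ∧ c < m ∧ Chain (min (m - c) c) cs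

def app (v : Int) (ds : List Int) : Int := ds.foldl (fun x c => 10 * x + c) v

lemma app_nil (v : Int) : app v [] = v := rfl

lemma app_cons (v c : Int) (cs : List Int) : app v (c :: cs) = app (10 * v + c) cs := rfl

lemma app_snoc (v : Int) (ds : List Int) (c : Int) : app v (ds ++ [c]) = 10 * app v ds + c := by
  simp [app, List.foldl_append]

lemma slackAfter_nil (m : Int) : slackAfter m [] = m := rfl

lemma slackAfter_cons (m c : Int) (cs : List Int) :
    slackAfter m (c :: cs) = slackAfter (min (m - c) c) cs := rfl

lemma chain_snoc (m : Int) (ds : List Int) (c : Int) :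
    Chain m (ds ++ [c]) ↔ Chain m ds ∧ 0 ≤ c ∧ c < slackAfter m ds := by
  induction ds generalizing m with
  | nil => simp [Chain, slackAfter_nil]
  | cons x t ih =>
    simp only [List.cons_append, Chain, slackAfter_cons, ih]
    tauto

lemma slackOf_singleton (d : Int) : slackOf [d] = d := rfl

lemma sound : ∀ (ds : List Int) (v : Nat), 1 ≤ v → Valid (dv v) →
    Chain (slackOf (dv v)) ds →
    ∃ w : Nat, app (v : Int) ds = (w : Int) ∧ v ≤ w ∧ Valid (dv w) ∧
      slackOf (dv w) = slackAfter (slackOf (dv v)) ds := by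
  intro ds
  induction ds with
  | nil =>
    intro v hv hval _
    exact ⟨v, rfl, le_refl v, hval, rfl⟩
  | cons c cs ih =>
    intro v hv hval hch
    obtain ⟨hc0, hcm, hch'⟩ := hch
    have hc9 : c < 10 := by have := slackOf_le_nine v; omega
    set v' : Nat := 10 * v + c.toNat with hv'
    have hcast : ((v' : Nat) : Int) = 10 * (v : Int) + c := by
      simp [hv']; omega
    have hdv' : dv v' = dv v ++ [c] := by
      rw [hv', dv_step v c.toNat hv (by omega)]
      congr 1
      simp
      omega
    have hval' : Valid (dv v') := by
      rw [hdv', Valid_snoc (dv v) (dv_ne_nil v) c]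
      exact hcm
    have hslack' : slackOf (dv v') = min (slackOf (dv v) - c) c := by
      rw [hdv', slack_snoc (dv v) (dv_ne_nil v) c]
    obtain ⟨w, hw1, hw2, hw3, hw4⟩ := ih v' (by omega) hval' (by rw [hslack']; exact hch')
    refine ⟨w, ?_, by omega, hw3, ?_⟩
    · rw [app_cons, ← hcast]
      exact hw1
    · rw [slackAfter_cons, ← hslack']
      exact hw4

lemma comp : ∀ n : Nat, Valid (dv n) → ∃ d : Nat, d < 10 ∧ ∃ ds : List Int,
    Chain (d : Int) ds ∧ (n : Int) = app (d : Int) ds ∧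
    slackAfter (d : Int) ds = slackOf (dv n) := by
  intro n
  induction n using Nat.strong_induction_on with
  | _ n ih =>
    intro hval
    by_cases h10 : n < 10
    · refine ⟨n, h10, [], trivial, rfl, ?_⟩
      rw [slackAfter_nil, dv_small n h10, slackOf_singleton]
    · set q := n / 10 with hq
      set r := n % 10 with hr
      have hq1 : 1 ≤ q := by omega
      have hn : n = 10 * q + r := by omega
      have hdv : dv n = dv q ++ [(r : Int)] := by
        rw [hn]; exact dv_step q r hq1 (by omega)
      have hvq : Valid (dv q) := Valid_prefix _ _ (Int.natCast_nonneg r) (by rw [← hdv]; exact hval)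
      have hrs : (r : Int) < slackOf (dv q) := by
        rw [hdv, Valid_snoc (dv q) (dv_ne_nil q) (r : Int)] at hval
        exact hval
      obtain ⟨d, hd, ds, hch, happ, hsl⟩ := ih q (by omega) hvq
      refine ⟨d, hd, ds ++ [(r : Int)], ?_, ?_, ?_⟩
      · rw [chain_snoc]
        exact ⟨hch, by omega, by omega⟩
      · rw [app_snoc, ← happ]
        omega
      · rw [slackAfter_snoc, hsl, hdv, slack_snoc (dv q) (dv_ne_nil q)]

def genP (v m : Int) : List Int :=
  [v] ++ (PySem.List.pyRange 0 m 1).attach.foldl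
    (fun res c => res ++ genP (10 * v + c.1) (min (m - c.1) c.1)) []
termination_by m.toNat
decreasing_by
  have hc := c.2
  rw [PySem.List.mem_pyRange_one] at hc
  rcases le_total (m - c.1) c.1 with h | h
  · rw [min_eq_left h]; omega
  · rw [min_eq_right h]; omega

lemma genP_eq (v m : Int) : genP v m =
    v :: (PySem.List.pyRange 0 m 1).attach.flatMap
      (fun c => genP (10 * v + c.1) (min (m - c.1) c.1)) := by
  rw [genP, PySem.List.foldl_append_eq_flatMap]
  rfl

lemma genB_eq (a b : Int) (s : List Char) (v m : Int) : genB a b s v m =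
    (if a ≤ v ∧ v ≤ b ∧ ¬ (PySem.Chars.isIn s (PySem.Int.toChars v) = true) then [v] else []) ++
    (PySem.List.pyRange 0 m 1).attach.flatMap
      (fun c => genB a b s (10 * v + c.1) (min (m - c.1) c.1)) := by
  rw [genB, PySem.List.foldl_append_eq_flatMap]

lemma min_toNat_lt (m c : Int) (h0 : 0 ≤ c) (hcm : c < m) : (min (m - c) c).toNat < m.toNat := by
  rcases le_total (m - c) c with h | h
  · rw [min_eq_left h]; omega
  · rw [min_eq_right h]; omega

lemma genB_eq_filter_aux (a b : Int) (s : List Char) : ∀ (n : Nat) (m v : Int), m.toNat ≤ n →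
    genB a b s v m = (genP v m).filter
      (fun w => decide (a ≤ w ∧ w ≤ b ∧ ¬ (PySem.Chars.isIn s (PySem.Int.toChars w) = true))) := by
  intro n
  induction n with
  | zero =>
    intro m v hm
    have h0 : PySem.List.pyRange 0 m 1 = [] := PySem.List.pyRange_one_eq_nil (by omega)
    rw [genB_eq, genP_eq, h0]
    simp only [List.attach_nil, List.flatMap_nil, List.append_nil, List.filter_cons,
      List.filter_nil]
    by_cases h : a ≤ v ∧ v ≤ b ∧ ¬ (PySem.Chars.isIn s (PySem.Int.toChars v) = true)
    · rw [if_pos h, if_pos (by simpa using h)]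
    · rw [if_neg h, if_neg (by simpa using h)]
  | succ n ih =>
    intro m v hm
    have hflat : (PySem.List.pyRange 0 m 1).attach.flatMap
          (fun c => genB a b s (10 * v + c.1) (min (m - c.1) c.1)) =
        ((PySem.List.pyRange 0 m 1).attach.flatMap
          (fun c => genP (10 * v + c.1) (min (m - c.1) c.1))).filter
          (fun w => decide (a ≤ w ∧ w ≤ b ∧ ¬ (PySem.Chars.isIn s (PySem.Int.toChars w) = true))) := by
      rw [List.filter_flatMap]
      refine List.flatMap_congr (fun c _ => ?_)
      have hc := c.2
      rw [PySem.List.mem_pyRange_one] at hc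
      exact ih _ _ (by have := min_toNat_lt m c.1 hc.1 hc.2; omega)
    rw [genB_eq, genP_eq, List.filter_cons, hflat]
    by_cases h : a ≤ v ∧ v ≤ b ∧ ¬ (PySem.Chars.isIn s (PySem.Int.toChars v) = true)
    · rw [if_pos h, if_pos (by simpa using h), List.singleton_append]
    · rw [if_neg h, if_neg (by simpa using h), List.nil_append]

lemma genB_eq_filter (a b : Int) (s : List Char) (v m : Int) :
    genB a b s v m = (genP v m).filter
      (fun w => decide (a ≤ w ∧ w ≤ b ∧ ¬ (PySem.Chars.isIn s (PySem.Int.toChars w) = true))) :=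
  genB_eq_filter_aux a b s m.toNat m v (le_refl _)

lemma mem_genP_aux : ∀ (n : Nat) (m v w : Int), m.toNat ≤ n →
    (w ∈ genP v m ↔ ∃ ds, Chain m ds ∧ w = app v ds) := by
  intro n
  induction n with
  | zero =>
    intro m v w hm
    have h0 : PySem.List.pyRange 0 m 1 = [] := PySem.List.pyRange_one_eq_nil (by omega)
    rw [genP_eq, h0]
    simp only [List.attach_nil, List.flatMap_nil, List.mem_singleton]
    constructor
    · rintro rfl; exact ⟨[], trivial, rfl⟩
    · rintro ⟨ds, hch, rfl⟩
      cases ds with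
      | nil => rfl
      | cons c cs =>
        obtain ⟨h1, h2, _⟩ := hch
        omega
  | succ n ih =>
    intro m v w hm
    rw [genP_eq]
    simp only [List.mem_cons, List.mem_flatMap, List.mem_attach, true_and]
    constructor
    · rintro (rfl | ⟨c, hw⟩)
      · exact ⟨[], trivial, rfl⟩
      · have hc := c.2
        rw [PySem.List.mem_pyRange_one] at hc
        have hlt := min_toNat_lt m c.1 hc.1 hc.2
        obtain ⟨cs, hch, rfl⟩ := (ih _ _ _ (by omega)).mp hw
        exact ⟨c.1 :: cs, ⟨hc.1, hc.2, hch⟩, rfl⟩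
    · rintro ⟨ds, hch, rfl⟩
      cases ds with
      | nil => exact Or.inl rfl
      | cons c cs =>
        obtain ⟨h1, h2, h3⟩ := hch
        refine Or.inr ⟨⟨c, ?_⟩, ?_⟩
        · rw [PySem.List.mem_pyRange_one]; exact ⟨h1, h2⟩
        · exact (ih _ _ _ (by have := min_toNat_lt m c h1 h2; omega)).mpr ⟨cs, h3, rfl⟩

lemma mem_genP (w v m : Int) : w ∈ genP v m ↔ ∃ ds, Chain m ds ∧ w = app v ds :=
  mem_genP_aux m.toNat m v w (le_refl _)

lemma pow_nonneg10 (e : Nat) : (0:Int) < 10^e := by positivity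

lemma pow_interval_disjoint (u1 u2 w : Int) (k e f : Nat)
    (h1 : (10:Int)^k ≤ u1) (h12 : u1 < u2) (h2 : u2 < 10^(k+1))
    (hw1 : u1 * 10^e ≤ w) (hw1' : w < (u1+1) * 10^e)
    (hw2 : u2 * 10^f ≤ w) (hw2' : w < (u2+1) * 10^f) : False := by
  rcases Nat.lt_trichotomy e f with hef | hef | hef
  · have c1 : (u1 + 1) * 10^e ≤ 10^(k+1) * 10^e :=
      mul_le_mul_of_nonneg_right (by omega) (le_of_lt (pow_nonneg10 e))
    have c2 : (10:Int)^(k+1) * 10^e = 10^(k+1+e) := by rw [← pow_add]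
    have c3 : (10:Int)^(k+1+e) ≤ 10^(k+f) := pow_le_pow_right₀ (by norm_num) (by omega)
    have c4 : (10:Int)^(k+f) = 10^k * 10^f := by rw [← pow_add]
    have c5 : (10:Int)^k * 10^f ≤ u2 * 10^f :=
      mul_le_mul_of_nonneg_right (by omega) (le_of_lt (pow_nonneg10 f))
    omega
  · subst hef
    have c1 : (u1 + 1) * 10^e ≤ u2 * 10^e :=
      mul_le_mul_of_nonneg_right (by omega) (le_of_lt (pow_nonneg10 e))
    omega
  · have c1 : (u2 + 1) * 10^f ≤ 10^(k+1) * 10^f :=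
      mul_le_mul_of_nonneg_right (by omega) (le_of_lt (pow_nonneg10 f))
    have c2 : (10:Int)^(k+1) * 10^f = 10^(k+1+f) := by rw [← pow_add]
    have c3 : (10:Int)^(k+1+f) ≤ 10^(k+e) := pow_le_pow_right₀ (by norm_num) (by omega)
    have c4 : (10:Int)^(k+e) = 10^k * 10^e := by rw [← pow_add]
    have c5 : (10:Int)^k * 10^e ≤ u1 * 10^e :=
      mul_le_mul_of_nonneg_right h1 (le_of_lt (pow_nonneg10 e))
    omega

lemma genP_props : ∀ (n : Nat) (m v : Int) (k : Nat), m.toNat ≤ n →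
    (10:Int)^k ≤ v → v < 10^(k+1) → m ≤ 10 →
    (genP v m).Nodup ∧ ∀ w ∈ genP v m, ∃ e : Nat, v * 10^e ≤ w ∧ w < (v+1) * 10^e := by
  intro n
  induction n with
  | zero =>
    intro m v k hm hk1 hk2 hm10
    have h0 : PySem.List.pyRange 0 m 1 = [] := PySem.List.pyRange_one_eq_nil (by omega)
    rw [genP_eq, h0]
    refine ⟨by simp, ?_⟩
    intro w hw
    simp at hw
    subst hw
    exact ⟨0, by simp, by simp⟩
  | succ n ih =>
    intro m v k hm hk1 hk2 hm10
    have hv1 : (1:Int) ≤ v := le_trans (one_le_pow₀ (by norm_num)) hk1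
    have hvlt : v ≤ 10^(k+1) - 1 := by omega
    -- facts about each branch
    have hbr : ∀ c : {x // x ∈ PySem.List.pyRange 0 m 1},
        (genP (10 * v + c.1) (min (m - c.1) c.1)).Nodup ∧
        ∀ w ∈ genP (10 * v + c.1) (min (m - c.1) c.1),
          ∃ e : Nat, (10 * v + c.1) * 10^e ≤ w ∧ w < (10 * v + c.1 + 1) * 10^e := by
      intro c
      have hc := c.2
      rw [PySem.List.mem_pyRange_one] at hc
      have hu1 : (10:Int)^(k+1) ≤ 10 * v + c.1 := by
        have : (10:Int)^(k+1) = 10 * 10^k := by ring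
        omega
      have hu2 : 10 * v + c.1 < 10^(k+1+1) := by
        have : (10:Int)^(k+1+1) = 10 * 10^(k+1) := by ring
        omega
      exact ih _ _ (k+1) (by have := min_toNat_lt m c.1 hc.1 hc.2; omega) hu1 hu2
        (le_trans (min_le_right _ _) (by omega))
    have hint : ∀ w ∈ genP v m, ∃ e : Nat, v * 10^e ≤ w ∧ w < (v+1) * 10^e := by
      intro w hw
      rw [genP_eq, List.mem_cons] at hw
      rcases hw with rfl | hw
      · exact ⟨0, by simp, by simp⟩
      · rw [List.mem_flatMap] at hw
        obtain ⟨c, _, hwc⟩ := hw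
        have hc := c.2
        rw [PySem.List.mem_pyRange_one] at hc
        obtain ⟨e, he1, he2⟩ := (hbr c).2 w hwc
        refine ⟨e + 1, ?_, ?_⟩
        · have : v * 10^(e+1) = (10 * v) * 10^e := by ring
          have h' : (10 * v) * 10^e ≤ (10 * v + c.1) * 10^e :=
            mul_le_mul_of_nonneg_right (by omega) (le_of_lt (pow_nonneg10 e))
          omega
        · have : (v + 1) * 10^(e+1) = (10 * v + 10) * 10^e := by ring
          have h' : (10 * v + c.1 + 1) * 10^e ≤ (10 * v + 10) * 10^e :=
            mul_le_mul_of_nonneg_right (by omega) (le_of_lt (pow_nonneg10 e))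
          omega
    refine ⟨?_, hint⟩
    rw [genP_eq, List.nodup_cons]
    constructor
    · -- v not in any branch
      intro hv
      rw [List.mem_flatMap] at hv
      obtain ⟨c, _, hvc⟩ := hv
      have hc := c.2
      rw [PySem.List.mem_pyRange_one] at hc
      obtain ⟨e, he1, he2⟩ := (hbr c).2 v hvc
      have h1 : (10 * v + c.1) * 1 ≤ (10 * v + c.1) * 10^e :=
        mul_le_mul_of_nonneg_left (by have := pow_nonneg10 e; omega) (by omega)
      omega
    · rw [List.nodup_flatMap]
      refine ⟨fun c _ => (hbr c).1, ?_⟩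
      have hpw : (PySem.List.pyRange 0 m 1).attach.Pairwise
          (fun c1 c2 => c1.1 < c2.1) := by
        have h0 := PySem.List.pairwise_lt_pyRange_one (a := 0) (b := m)
        have h1 : ((PySem.List.pyRange 0 m 1).attach.map Subtype.val).Pairwise (· < ·) := by
          rw [List.attach_map_subtype_val]
          exact h0
        exact List.pairwise_map.mp h1
      refine hpw.imp ?_
      intro c1 c2 hlt w hw1 hw2
      have hc1 := c1.2
      have hc2 := c2.2
      rw [PySem.List.mem_pyRange_one] at hc1 hc2
      obtain ⟨e, he1, he2⟩ := (hbr c1).2 w hw1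
      obtain ⟨f, hf1, hf2⟩ := (hbr c2).2 w hw2
      have hu1 : (10:Int)^(k+1) ≤ 10 * v + c1.1 := by
        have : (10:Int)^(k+1) = 10 * 10^k := by ring
        omega
      have hu2 : 10 * v + c2.1 < 10^(k+1+1) := by
        have : (10:Int)^(k+1+1) = 10 * 10^(k+1) := by ring
        omega
      exact pow_interval_disjoint (10*v+c1.1) (10*v+c2.1) w (k+1) e f hu1 (by omega) hu2
        he1 he2 hf1 hf2

def genAllP : List Int := (PySem.List.pyRange 0 10 1).foldl (fun l d => l ++ genP d d) []

lemma genAllP_eq : genAllP = (PySem.List.pyRange 0 10 1).flatMap (fun d => genP d d) := by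
  rw [genAllP, PySem.List.foldl_append_eq_flatMap]
  rfl

lemma genP_zero : genP 0 0 = [0] := by
  rw [genP_eq, PySem.List.pyRange_one_eq_nil (le_refl 0)]
  rfl

lemma genP_seed_props (d : Int) (h1 : 1 ≤ d) (h2 : d < 10) :
    (genP d d).Nodup ∧ ∀ w ∈ genP d d, ∃ e : Nat, d * 10^e ≤ w ∧ w < (d+1) * 10^e :=
  genP_props d.toNat d d 0 (le_refl _) (by simpa using h1) (by simpa using h2) (by omega)

lemma genAllP_nodup : genAllP.Nodup := by
  rw [genAllP_eq, List.nodup_flatMap]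
  constructor
  · intro d hd
    rw [PySem.List.mem_pyRange_one] at hd
    rcases eq_or_lt_of_le hd.1 with h0 | h0
    · rw [← h0, genP_zero]; simp
    · exact (genP_seed_props d h0 hd.2).1
  · refine List.Pairwise.imp_of_mem ?_
      (PySem.List.pairwise_lt_pyRange_one (a := 0) (b := 10))
    intro d1 d2 hd1 hd2 hlt w hw1 hw2
    have hw1 : w ∈ genP d1 d1 := hw1
    have hw2 : w ∈ genP d2 d2 := hw2
    rw [PySem.List.mem_pyRange_one] at hd1 hd2
    rcases eq_or_lt_of_le hd1.1 with h01 | h01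
    · -- d1 = 0 : genP 0 0 = [0], so w = 0, but branch d2 has w ≥ d2 ≥ 1
      rw [← h01, genP_zero] at hw1
      simp at hw1
      subst hw1
      obtain ⟨f, hf1, _⟩ := (genP_seed_props d2 (by omega) hd2.2).2 0 hw2
      have := pow_nonneg10 f
      nlinarith
    · obtain ⟨e, he1, he2⟩ := (genP_seed_props d1 h01 hd1.2).2 w hw1
      obtain ⟨f, hf1, hf2⟩ := (genP_seed_props d2 (by omega) hd2.2).2 w hw2
      exact pow_interval_disjoint d1 d2 w 0 e f (by simpa using h01) hlt
        (by simpa using hd2.2) he1 he2 hf1 hf2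

lemma chain_zero (ds : List Int) (h : Chain 0 ds) : ds = [] := by
  cases ds with
  | nil => rfl
  | cons c cs => obtain ⟨h1, h2, _⟩ := h; omega

lemma mem_genAllP (w : Int) : w ∈ genAllP ↔ 0 ≤ w ∧ Valid (dv w.toNat) := by
  rw [genAllP_eq, List.mem_flatMap]
  constructor
  · rintro ⟨d, hd, hw⟩
    rw [PySem.List.mem_pyRange_one] at hd
    obtain ⟨ds, hch, rfl⟩ := (mem_genP w d d).mp hw
    rcases eq_or_lt_of_le hd.1 with h0 | h0
    · rw [← h0] at hch ⊢
      rw [chain_zero ds hch]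
      refine ⟨le_refl 0, ?_⟩
      have : dv (0:Int).toNat = [(0:Int)] := dv_small 0 (by norm_num)
      rw [app_nil, this]
      exact Valid_singleton 0
    · have hdv : dv d.toNat = [d] := by
        rw [dv_small d.toNat (by omega)]
        congr 1
        omega
      have hval : Valid (dv d.toNat) := by rw [hdv]; exact Valid_singleton d
      have hslack : slackOf (dv d.toNat) = d := by rw [hdv, slackOf_singleton]
      obtain ⟨w', hw1, hw2, hw3, _⟩ := sound ds d.toNat (by omega) hval
        (by rw [hslack]; exact hch)
      have hcast : app d ds = (w' : Int) := by
        convert hw1 using 2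
        omega
      rw [hcast]
      refine ⟨by positivity, ?_⟩
      rw [Int.toNat_natCast]
      exact hw3
  · rintro ⟨hw0, hval⟩
    obtain ⟨d, hd, ds, hch, happ, _⟩ := comp w.toNat hval
    refine ⟨d, ?_, ?_⟩
    · rw [PySem.List.mem_pyRange_one]
      constructor <;> [positivity; exact_mod_cast hd]
    · rw [mem_genP]
      exact ⟨ds, hch, by omega⟩

def badb (cs : List Char) (j : Nat) : Bool :=
  decide (pyIntChar (PySem.List.pyGetD cs (j : Int) '0') ≤
    ((PySem.List.slice cs (some ((j : Int) + 1)) none).map pyIntChar).sum)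

lemma loopA_eq_aux (cs : List Char) : ∀ (n : Nat) (index flag : Int), (index + 1).toNat ≤ n →
    loopA cs index flag = if (List.range (index + 1).toNat).any (badb cs) then 0 else flag := by
  intro n
  induction n with
  | zero =>
    intro index flag h
    rw [loopA, dif_neg (by omega)]
    have : (index + 1).toNat = 0 := by omega
    rw [this]
    simp
  | succ n ih =>
    intro index flag h
    by_cases hidx : index > -1
    · rw [loopA, dif_pos hidx]
      rw [ih (index - 1) _ (by omega)]
      have h1 : (index - 1 + 1).toNat = index.toNat := by omega
      have h2 : (index + 1).toNat = index.toNat + 1 := by omega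
      rw [h1, h2, List.range_succ, List.any_append]
      have hbad : badb cs index.toNat =
          decide (pyIntChar (PySem.List.pyGetD cs index '0') ≤
            ((PySem.List.slice cs (some (index + 1)) none).map pyIntChar).sum) := by
        rw [badb, show ((index.toNat : Nat) : Int) = index by omega]
      by_cases hb : pyIntChar (PySem.List.pyGetD cs index '0') ≤
          ((PySem.List.slice cs (some (index + 1)) none).map pyIntChar).sum
      · rw [if_pos hb]
        have : (List.range index.toNat ++ [index.toNat]).any (badb cs) = true := by
          rw [List.any_append]
          simp only [List.any_cons, List.any_nil, Bool.or_false]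
          rw [hbad]
          simp [hb]
        rw [List.any_append] at this
        rw [this]
        split <;> rfl
      · rw [if_neg hb]
        have hone : (List.any [index.toNat] (badb cs)) = false := by
          simp only [List.any_cons, List.any_nil, Bool.or_false]
          rw [hbad]
          simpa using hb
        rw [hone, Bool.or_false]
    · rw [loopA, dif_neg hidx]
      have : (index + 1).toNat = 0 := by omega
      rw [this]
      simp

lemma loopA_eq (cs : List Char) (index flag : Int) :
    loopA cs index flag = if (List.range (index + 1).toNat).any (badb cs) then 0 else flag :=
  loopA_eq_aux cs (index + 1).toNat index flag (le_refl _)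

lemma getD_map_pyIntChar (cs : List Char) (j : Nat) (h : j < cs.length) :
    (cs.map pyIntChar).getD j 0 = pyIntChar (cs.getD j '0') := by
  rw [List.getD_eq_getElem _ _ (by simpa using h), List.getD_eq_getElem _ _ h, List.getElem_map]

lemma flag_iff_Valid (cs : List Char) :
    loopA cs (PySem.List.len cs - 2) 1 ≠ 0 ↔ Valid (cs.map pyIntChar) := by
  rw [loopA_eq]
  have hlen : (PySem.List.len cs - 2 + 1).toNat = cs.length - 1 := by
    rw [PySem.List.len_eq]
    omega
  rw [hlen]
  constructor
  · intro h j hj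
    have hany : (List.range (cs.length - 1)).any (badb cs) = false := by
      by_contra hb
      rw [if_pos (by simpa using hb)] at h
      exact h rfl
    rw [List.any_eq_false] at hany
    rw [List.length_map] at hj
    have hbad := hany j (by rw [List.mem_range]; omega)
    rw [badb] at hbad
    simp only [decide_eq_true_eq] at hbad
    push_neg at hbad
    rw [PySem.List.pyGetD_natCast] at hbad
    have hslice : PySem.List.slice cs (some ((j:Int) + 1)) none = cs.drop (j+1) := by
      have : ((j:Int) + 1) = ((j+1 : Nat) : Int) := by push_cast; ring
      rw [this, PySem.List.slice_from_natCast]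
    rw [hslice, List.map_drop] at hbad
    rw [getD_map_pyIntChar cs j (by omega)]
    omega
  · intro hval
    have hany : (List.range (cs.length - 1)).any (badb cs) = false := by
      rw [List.any_eq_false]
      intro j hj
      rw [List.mem_range] at hj
      have := hval j (by rw [List.length_map]; omega)
      rw [badb]
      simp only [decide_eq_true_eq]
      push_neg
      rw [PySem.List.pyGetD_natCast]
      have hslice : PySem.List.slice cs (some ((j:Int) + 1)) none = cs.drop (j+1) := by
        have : ((j:Int) + 1) = ((j+1 : Nat) : Int) := by push_cast; ring
        rw [this, PySem.List.slice_from_natCast]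
      rw [hslice, List.map_drop]
      rw [getD_map_pyIntChar cs j (by omega)] at this
      omega
    rw [hany]
    simp

lemma goodNumbers_alt_eq (a b digit : Int) :
    goodNumbers_alt a b digit = PySem.List.sorted
      (genAllP.filter (fun w => decide (a ≤ w ∧ w ≤ b ∧
        ¬ (PySem.Chars.isIn (PySem.Int.toChars digit) (PySem.Int.toChars w) = true))))
      (fun x => x) false := by
  rw [goodNumbers_alt]
  congr 1
  rw [genAllP_eq, PySem.List.foldl_append_eq_flatMap, List.nil_append, List.filter_flatMap]
  exact List.flatMap_congr (fun d _ => genB_eq_filter a b _ d d)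

lemma goodNumbers_eq (a b digit : Int) :
    goodNumbers a b digit = (PySem.List.pyRange a (b+1) 1).filter
      (fun i => decide (¬ (PySem.Chars.isIn (PySem.Int.toChars digit) (PySem.Int.toChars i) = true) ∧
        loopA (PySem.Int.toChars i) (PySem.List.len (PySem.Int.toChars i) - 2) 1 ≠ 0)) := by
  rw [goodNumbers]
  have hfun : (fun (arr : List Int) (i : Int) =>
      if PySem.Chars.isIn (PySem.Int.toChars digit) (PySem.Int.toChars i) then arr
      else
        let s := PySem.Int.toChars i
        let flag := loopA s (PySem.List.len s - 2) 1
        if flag ≠ 0 then arr ++ [i] else arr) =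
      (fun (arr : List Int) (i : Int) =>
        if ¬ (PySem.Chars.isIn (PySem.Int.toChars digit) (PySem.Int.toChars i) = true) ∧
          loopA (PySem.Int.toChars i) (PySem.List.len (PySem.Int.toChars i) - 2) 1 ≠ 0
        then arr ++ [i] else arr) := by
    funext arr i
    by_cases h1 : PySem.Chars.isIn (PySem.Int.toChars digit) (PySem.Int.toChars i) = true
    · rw [if_pos h1, if_neg (by tauto)]
    · rw [if_neg (by simpa using h1)]
      by_cases h2 : loopA (PySem.Int.toChars i) (PySem.List.len (PySem.Int.toChars i) - 2) 1 ≠ 0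
      · rw [if_pos h2, if_pos ⟨h1, h2⟩]
      · rw [if_neg h2, if_neg (by tauto)]
  rw [hfun, PySem.List.foldl_append_ite_eq_filter, List.nil_append]

lemma valid_iff_loop (w : Int) (hw : 0 ≤ w) :
    (loopA (PySem.Int.toChars w) (PySem.List.len (PySem.Int.toChars w) - 2) 1 ≠ 0) ↔
      Valid (dv w.toNat) := by
  rw [flag_iff_Valid, toChars_nonneg w hw]
  rfl

-- ===== VERDICT (by name: the statement is the Claim_ definition above) =====
theorem goodNumbers_spec : Claim_equal_goodNumbers := by
  intro a b digit _hdom hpre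
  unfold Spec_goodNumbers
  rcases hpre with hpre | hpre
  · -- 0 ≤ a : both sides enumerate the same set in increasing order
    rw [goodNumbers_alt_eq]
    have hperm : (goodNumbers a b digit).Perm
        (genAllP.filter (fun w => decide (a ≤ w ∧ w ≤ b ∧
          ¬ (PySem.Chars.isIn (PySem.Int.toChars digit) (PySem.Int.toChars w) = true)))) := by
      rw [List.perm_ext_iff_of_nodup]
      · intro w
        rw [goodNumbers_eq, List.mem_filter, List.mem_filter, PySem.List.mem_pyRange_one]
        simp only [decide_eq_true_eq]
        constructor
        · rintro ⟨⟨hw1, hw2⟩, hsub, hloop⟩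
          have hw0 : 0 ≤ w := by omega
          refine ⟨(mem_genAllP w).mpr ⟨hw0, (valid_iff_loop w hw0).mp hloop⟩, hw1, by omega, hsub⟩
        · rintro ⟨hmem, hw1, hw2, hsub⟩
          have hw0 : 0 ≤ w := by omega
          obtain ⟨_, hval⟩ := (mem_genAllP w).mp hmem
          exact ⟨⟨hw1, by omega⟩, hsub, (valid_iff_loop w hw0).mpr hval⟩
      · rw [goodNumbers_eq]
        exact (PySem.List.nodup_pyRange_one (a := a) (b := b + 1)).filter _
      · exact genAllP_nodup.filter _
    have hpw : (goodNumbers a b digit).Pairwise (fun x y => x < y) := by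
      rw [goodNumbers_eq]
      exact (PySem.List.pairwise_lt_pyRange_one (a := a) (b := b + 1)).filter _
    exact (PySem.List.sorted_eq_of_perm_of_pairwise_lt _ _ _ hperm hpw).symm
  · -- b < a : both sides are empty
    rw [goodNumbers_eq, goodNumbers_alt_eq, PySem.List.pyRange_one_eq_nil (by omega),
      List.filter_nil]
    have hf : genAllP.filter (fun w => decide (a ≤ w ∧ w ≤ b ∧
        ¬ (PySem.Chars.isIn (PySem.Int.toChars digit) (PySem.Int.toChars w) = true))) = [] := by
      rw [List.filter_eq_nil_iff]
      intro w _
      simp only [decide_eq_true_eq]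
      rintro ⟨h1, h2, _⟩
      omega
    rw [hf]
    exact (PySem.List.sorted_eq_nil_iff _ _ _).mpr rfl |>.symm
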